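-- pv_equiv track=rewrite | github.com/Johesive/CRISPRTE | scripts/log_stats.py | format_operations
-- ===== SOURCE A (Python) =====
-- def format_operations(records, total):
--     lines = []
--
--      # Single TE Copy: getGRNAByTedup + 'dup' in te_dup
--     f1 = sum(1 for r in records
--              if r['key'] == 'getGRNAByTedup' and ('dup' in r['te_dup'] or 'copy' in r['te_dup']))
--     percentage1 = round(f1 / total * 100) if total > 0 else 0
--     lines.append(f"    {'Targeting Single TE Copy':<45} {f1:>5}")
--     # lines.append(f"    {'Targeting Single TE Copy':<45} {f1:>5} ({percentage1}%)")
--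
--     # TE Subfamily: getGRNAByTedup without 'dup', or getGRNACombinationByTeclass
--     f2 = sum(1 for r in records
--              if (r['key'] == 'getGRNAByTedup' and 'dup' not in r['te_dup'] and 'copy' not in r['te_dup'])
--              or r['key'] == 'getGRNACombinationByTeclass')
--     percentage2 = round(f2 / total * 100) if total > 0 else 0
--     lines.append(f"    {'Targeting TE Subfamily':<45} {f2:>5}")
--     # lines.append(f"    {'Targeting TE Subfamily':<45} {f2:>5} ({percentage2}%)")
--
--     # Targeting TEs within Genomic Coordinate: getGtfByRegion
--     f3 = sum(1 for r in records if (r['key'] == 'getGtfByRegion' and r.get('source') == 'design'))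
--     percentage3 = round(f3 / total * 100) if total > 0 else 0
--     lines.append(f"    {'Targeting TEs within Genomic Coordinate':<45} {f3:>5}")
--     # lines.append(f"    {'Targeting TEs within Genomic Coordinate':<45} {f3:>5} ({percentage3}%)")
--
--     # others
--     # others = total - f1 - f2 - f3
--     # others_percentage = round(others / total * 100) if total > 0 else 0
--     # lines.append(f"    {'others':<45} {others:>5} ({others_percentage}%)")
--
--     return "\n".join(lines)
-- ===== SOURCE B (Python) =====
-- def format_operations(records, total):
--     single = subfam = genomic = 0
--     for r in records:
--         key = r['key']
--         if key == 'getGRNAByTedup':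
--             if 'dup' in r['te_dup'] or 'copy' in r['te_dup']:
--                 single += 1
--             else:
--                 subfam += 1
--         elif key == 'getGRNACombinationByTeclass':
--             subfam += 1
--         elif key == 'getGtfByRegion' and r.get('source') == 'design':
--             genomic += 1
--     return "\n".join(
--         f"    {label:<45} {n:>5}"
--         for label, n in (
--             ("Targeting Single TE Copy", single),
--             ("Targeting TE Subfamily", subfam),
--             ("Targeting TEs within Genomic Coordinate", genomic),
--         ))
-- ===== Notes on version B (the rewrite author's own statement) =====
-- stated objective: alternative
-- what changed: One single pass over records with three counters classified by an if/elif chain replaces A's three separate generator-expression scans (and the unused percentage computations are dropped); the three stat lines are then built from the counters.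
import Mathlib
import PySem

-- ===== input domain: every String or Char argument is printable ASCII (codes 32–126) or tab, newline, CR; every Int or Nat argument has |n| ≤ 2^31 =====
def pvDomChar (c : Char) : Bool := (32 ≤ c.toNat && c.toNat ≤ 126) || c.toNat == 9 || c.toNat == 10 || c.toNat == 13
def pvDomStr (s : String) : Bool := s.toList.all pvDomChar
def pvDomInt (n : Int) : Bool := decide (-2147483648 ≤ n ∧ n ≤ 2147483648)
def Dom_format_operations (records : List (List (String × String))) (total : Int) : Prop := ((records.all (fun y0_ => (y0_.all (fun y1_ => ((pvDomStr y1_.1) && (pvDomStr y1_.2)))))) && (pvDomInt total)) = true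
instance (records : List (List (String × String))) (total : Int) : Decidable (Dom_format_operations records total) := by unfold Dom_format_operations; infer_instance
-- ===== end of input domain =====

-- B replaces A's three separate passes over `records` with one single-pass fold carrying three
-- counters (objective: alternative decomposition; the unused percentage computations are dropped).

-- shared formatting helper: f"    {label:<45} {n:>5}"  (both Pythons build the identical lines)
def fmtStatLine (label : String) (n : Int) : String :=
  String.mk ("    ".toList ++ label.toList
    ++ List.replicate (45 - label.toList.length) ' '
    ++ " ".toList
    ++ (let ds := (PySem.Int.toStr n).toList
        List.replicate (5 - ds.length) ' ' ++ ds))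

-- ===== PORT A =====
-- the three counting predicates of A's generator expressions (under Pre_ the dict lookups succeed,
-- so getD with "" is exact)
def pvA_isF1 (r : List (String × String)) : Bool :=
  ((PySem.Dict.mk r).getD "key" "" == "getGRNAByTedup")
    && (PySem.Str.isIn "dup" ((PySem.Dict.mk r).getD "te_dup" "")
        || PySem.Str.isIn "copy" ((PySem.Dict.mk r).getD "te_dup" ""))

def pvA_isF2 (r : List (String × String)) : Bool :=
  (((PySem.Dict.mk r).getD "key" "" == "getGRNAByTedup")
      && !PySem.Str.isIn "dup" ((PySem.Dict.mk r).getD "te_dup" "")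
      && !PySem.Str.isIn "copy" ((PySem.Dict.mk r).getD "te_dup" ""))
    || ((PySem.Dict.mk r).getD "key" "" == "getGRNACombinationByTeclass")

def pvA_isF3 (r : List (String × String)) : Bool :=
  ((PySem.Dict.mk r).getD "key" "" == "getGtfByRegion")
    && ((PySem.Dict.mk r).get? "source" == some "design")

def format_operations (records : List (List (String × String))) (total : Int) : String :=
  let f1 : Int := (records.countP (fun r => pvA_isF1 r) : Int)
  let f2 : Int := (records.countP (fun r => pvA_isF2 r) : Int)
  let f3 : Int := (records.countP (fun r => pvA_isF3 r) : Int)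
  PySem.Str.join "\n"
    [fmtStatLine "Targeting Single TE Copy" f1,
     fmtStatLine "Targeting TE Subfamily" f2,
     fmtStatLine "Targeting TEs within Genomic Coordinate" f3]

-- ===== PORT B =====
-- one pass: classify each record into one of the three counters (or none)
def pvB_step (s : Int × Int × Int) (r : List (String × String)) : Int × Int × Int :=
  let d := PySem.Dict.mk r
  let key := d.getD "key" ""
  if key == "getGRNAByTedup" then
    if PySem.Str.isIn "dup" (d.getD "te_dup" "") || PySem.Str.isIn "copy" (d.getD "te_dup" "") then
      (s.1 + 1, s.2.1, s.2.2)
    else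
      (s.1, s.2.1 + 1, s.2.2)
  else if key == "getGRNACombinationByTeclass" then
    (s.1, s.2.1 + 1, s.2.2)
  else if key == "getGtfByRegion" && (d.get? "source" == some "design") then
    (s.1, s.2.1, s.2.2 + 1)
  else s

def format_operations_alt (records : List (List (String × String))) (total : Int) : String :=
  let c := records.foldl pvB_step (0, 0, 0)
  PySem.Str.join "\n"
    [fmtStatLine "Targeting Single TE Copy" c.1,
     fmtStatLine "Targeting TE Subfamily" c.2.1,
     fmtStatLine "Targeting TEs within Genomic Coordinate" c.2.2]

-- ===== PRECONDITION & SPEC =====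
-- Pre_: exactly where Python A returns — every record has key 'key', and records whose 'key' is
-- 'getGRNAByTedup' also have key 'te_dup' (otherwise A raises KeyError).
def Pre_format_operations (records : List (List (String × String))) (total : Int) : Prop :=
  records.all (fun r =>
    (PySem.Dict.mk r).contains "key"
      && (!((PySem.Dict.mk r).getD "key" "" == "getGRNAByTedup")
          || (PySem.Dict.mk r).contains "te_dup")) = true
instance (records : List (List (String × String))) (total : Int) : Decidable (Pre_format_operations records total) := by unfold Pre_format_operations; infer_instance

def pvWitness_format_operations : (List (List (String × String))) × Int :=
  ([[("key", "getGRNAByTedup"), ("te_dup", "dup_3")], [("key", "getGtfByRegion"), ("source", "design")]], 2)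

def Spec_format_operations (records : List (List (String × String))) (total : Int) (out : String) : Prop := out = format_operations_alt records total
instance (records : List (List (String × String))) (total : Int) (out : String) : Decidable (Spec_format_operations records total out) := by unfold Spec_format_operations; infer_instance

-- ===== CLAIM (what is proved, stated in full; the proofs are below) =====
def Claim_equal_format_operations : Prop := ∀ (records : List (List (String × String))) (total : Int), Dom_format_operations records total → Pre_format_operations records total → Spec_format_operations records total (format_operations records total)

-- ===== LEMMAS AND PROOFS =====

-- each record moves the three counters exactly as A's three predicates count it
theorem pvB_step_eq (s : Int × Int × Int) (r : List (String × String)) :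
    pvB_step s r = (s.1 + (if pvA_isF1 r then 1 else 0),
                    s.2.1 + (if pvA_isF2 r then 1 else 0),
                    s.2.2 + (if pvA_isF3 r then 1 else 0)) := by
  unfold pvB_step pvA_isF1 pvA_isF2 pvA_isF3
  have e12 : ("getGRNAByTedup" : String) ≠ "getGRNACombinationByTeclass" := by decide
  have e13 : ("getGRNAByTedup" : String) ≠ "getGtfByRegion" := by decide
  have e23 : ("getGRNACombinationByTeclass" : String) ≠ "getGtfByRegion" := by decide
  by_cases h1 : (PySem.Dict.mk r).getD "key" "" = "getGRNAByTedup"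
  · simp [h1, e12, e13]
    split_ifs with hA hB <;> simp_all [not_or]
  · by_cases h4 : (PySem.Dict.mk r).getD "key" "" = "getGRNACombinationByTeclass"
    · simp [h1, h4, e23]
    · by_cases h5 : (PySem.Dict.mk r).getD "key" "" = "getGtfByRegion"
      · by_cases h6 : (PySem.Dict.mk r).get? "source" = some "design"
        · simp [h1, h4, h5, h6]
        · simp [h1, h4, h5, h6]
      · simp [h1, h4, h5]

-- the fold's invariant: pvB_step accumulates exactly A's three counts
theorem pvB_fold_counts (records : List (List (String × String))) (a b c : Int) :
    records.foldl pvB_step (a, b, c)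
      = (a + (records.countP (fun r => pvA_isF1 r) : Int),
         b + (records.countP (fun r => pvA_isF2 r) : Int),
         c + (records.countP (fun r => pvA_isF3 r) : Int)) := by
  induction records generalizing a b c with
  | nil => simp
  | cons r rs ih =>
    rw [List.foldl_cons, pvB_step_eq, ih]
    simp only [List.countP_cons, Prod.mk.injEq]
    refine ⟨?_, ?_, ?_⟩
    · by_cases hp : pvA_isF1 r <;> simp [hp] <;> push_cast <;> ring
    · by_cases hp : pvA_isF2 r <;> simp [hp] <;> push_cast <;> ring
    · by_cases hp : pvA_isF3 r <;> simp [hp] <;> push_cast <;> ring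

-- ===== VERDICT (by name: the statement is the Claim_ definition above) =====
theorem format_operations_spec : Claim_equal_format_operations := by
  intro records total _ _
  unfold Spec_format_operations format_operations format_operations_alt
  rw [pvB_fold_counts]
  simp
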